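-- pv_equiv track=rewrite | github.com/ajay-sudosu/my_files | programming_questions/count_consecutive_vowel.py | count_vow_
-- ===== SOURCE A (Python) =====
-- def count_vow_(s):
--     count = 0
--     prev_count = 0
--     vow = "AEIOUaeiou"
--     i = 0
--     while i < len(s):
--         if s[i] in vow:
--             count += 1
--             if count > prev_count:
--                 prev_count = count
--             i += 1
--         else:
--             count = 0
--             i += 1
--     return prev_count
-- ===== SOURCE B (Python) =====
-- def count_vow_(s):
--     vow = "AEIOUaeiou"
--     words = "".join(c if c in vow else " " for c in s).split()
--     return max((len(w) for w in words), default=0)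
-- ===== Notes on version B (the rewrite author's own statement) =====
-- stated objective: idiomatic
-- what changed: B replaces the index-driven while loop with running count/best counters by a declarative pipeline: blank out non-vowels, split the string into maximal vowel runs, and take the max run length with default 0.
import Mathlib
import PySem

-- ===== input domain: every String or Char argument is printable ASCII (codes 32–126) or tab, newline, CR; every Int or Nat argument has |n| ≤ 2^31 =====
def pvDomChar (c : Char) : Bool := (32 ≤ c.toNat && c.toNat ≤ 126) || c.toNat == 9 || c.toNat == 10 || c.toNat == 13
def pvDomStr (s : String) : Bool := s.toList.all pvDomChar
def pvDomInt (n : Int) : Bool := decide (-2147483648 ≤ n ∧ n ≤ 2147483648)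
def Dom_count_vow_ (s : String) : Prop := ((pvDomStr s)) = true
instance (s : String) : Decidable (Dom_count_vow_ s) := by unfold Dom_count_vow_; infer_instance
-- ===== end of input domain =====

-- B replaces A's index-driven counter loop by: blank out non-vowels, split into maximal
-- vowel runs, take the max run length (default 0). Equivalence of return values is proved on all inputs.

-- ===== PORT A =====
-- the while loop over i with state (count, prev_count), transcribed as structural
-- recursion consuming s[i:] ; `s[i] in vow` is char membership in the 10 vowel chars
def countVowLoopA : List Char → Int → Int → Int
  | [], _, prev => prev
  | c :: rest, count, prev =>
      if (['A','E','I','O','U','a','e','i','o','u'] : List Char).contains c then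
        let count' := count + 1
        let prev' := if count' > prev then count' else prev
        countVowLoopA rest count' prev'
      else
        countVowLoopA rest 0 prev

def count_vow_ (s : String) : Int := countVowLoopA s.toList 0 0

-- ===== PORT B =====
-- "".join(c if c in vow else " " for c in s).split() then max of lengths, default 0
def count_vow__alt (s : String) : Int :=
  let vow : List Char := ['A','E','I','O','U','a','e','i','o','u']
  let blanked : List Char := s.toList.map (fun c => if vow.contains c then c else ' ')
  let words : List (List Char) := PySem.Chars.split₀ blanked
  PySem.List.maxD (words.map (fun w => (w.length : Int))) (fun x => x) 0

-- ===== PRECONDITION & SPEC =====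
def Spec_count_vow_ (s : String) (out : Int) : Prop := out = count_vow__alt s
instance (s : String) (out : Int) : Decidable (Spec_count_vow_ s out) := by unfold Spec_count_vow_; infer_instance

-- ===== CLAIM (what is proved, stated in full; the proofs are below) =====
def Claim_equal_count_vow_ : Prop := ∀ (s : String), Dom_count_vow_ s → Spec_count_vow_ s (count_vow_ s)

-- ===== LEMMAS AND PROOFS =====

-- lengths of maximal vowel runs of l, where the current run already has length n
def runLens : List Char → Nat → List Int
  | [], n => if n = 0 then [] else [(n : Int)]
  | c :: r, n =>
      if (['A','E','I','O','U','a','e','i','o','u'] : List Char).contains c then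
        runLens r (n + 1)
      else
        if n = 0 then runLens r 0 else (n : Int) :: runLens r 0

theorem runLens_pos : ∀ (l : List Char) (n : Nat) (x : Int), x ∈ runLens l n → 1 ≤ x := by
  intro l
  induction l with
  | nil =>
    intro n x hx
    simp only [runLens] at hx
    split at hx <;> simp at hx <;> omega
  | cons c r ih =>
    intro n x hx
    simp only [runLens] at hx
    split at hx
    · exact ih _ _ hx
    · split at hx
      · exact ih _ _ hx
      · rcases List.mem_cons.1 hx with h | h
        · subst h; omega
        · exact ih _ _ h

theorem runLens_head : ∀ (l : List Char) (n : Nat), 1 ≤ n →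
    ∃ m t, runLens l n = m :: t ∧ (n : Int) ≤ m := by
  intro l
  induction l with
  | nil =>
    intro n hn
    refine ⟨(n : Int), [], ?_, le_refl _⟩
    simp only [runLens]
    split <;> first | omega | rfl
  | cons c r ih =>
    intro n hn
    simp only [runLens]
    split
    · obtain ⟨m, t, h1, h2⟩ := ih (n + 1) (by omega)
      exact ⟨m, t, h1, by push_cast; push_cast at h2; omega⟩
    · split
      · omega
      · exact ⟨(n : Int), runLens r 0, rfl, le_refl _⟩

theorem loopA_eq_foldl : ∀ (l : List Char) (n : Nat) (p : Int), (n : Int) ≤ p →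
    countVowLoopA l (n : Int) p = (runLens l n).foldl max p := by
  intro l
  induction l with
  | nil =>
    intro n p hp
    simp only [countVowLoopA, runLens]
    split
    · simp
    · simp only [List.foldl_cons, List.foldl_nil]; omega
  | cons c r ih =>
    intro n p hp
    simp only [countVowLoopA, runLens]
    by_cases hc : (['A','E','I','O','U','a','e','i','o','u'] : List Char).contains c = true
    · simp only [hc, if_true]
      have hcast : (n : Int) + 1 = ((n + 1 : Nat) : Int) := by push_cast; ring
      have hif : (if (n : Int) + 1 > p then (n : Int) + 1 else p) = max p ((n : Int) + 1) := by
        split <;> omega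
      rw [hcast] at hif
      rw [hcast, hif, ih (n + 1) _ (by push_cast; omega)]
      obtain ⟨m, t, hrt, hm⟩ := runLens_head r (n + 1) (by omega)
      rw [hrt]
      simp only [List.foldl_cons]
      have : max (max p ((n + 1 : Nat) : Int)) m = max p m := by omega
      rw [this]
    · simp only [Bool.not_eq_true] at hc
      simp only [hc, Bool.false_eq_true, if_false]
      rw [show (0 : Int) = ((0 : Nat) : Int) by rfl, ih 0 p (by omega)]
      by_cases hn : n = 0
      · simp [hn]
      · simp only [hn, if_false, List.foldl_cons]
        have : max p (n : Int) = p := by omega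
        rw [this]

theorem vowel_not_space (c : Char)
    (hc : (['A','E','I','O','U','a','e','i','o','u'] : List Char).contains c = true) :
    PySem.Chars.isspace c = false := by
  simp only [List.contains_eq_mem, decide_eq_true_eq, List.mem_cons, List.not_mem_nil, or_false] at hc
  rcases hc with h|h|h|h|h|h|h|h|h|h <;> subst h <;> decide

theorem split_go_eq_runLens : ∀ (l : List Char) (cur : List Char) (acc : List (List Char)),
    (PySem.Chars.split₀.go
        (l.map (fun c => if (['A','E','I','O','U','a','e','i','o','u'] : List Char).contains c then c else ' '))
        cur acc).map (fun w => (w.length : Int))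
      = acc.reverse.map (fun w => (w.length : Int)) ++ runLens l cur.length := by
  intro l
  induction l with
  | nil =>
    intro cur acc
    simp only [List.map_nil, PySem.Chars.split₀.go, runLens]
    by_cases hcur : cur.isEmpty = true
    · have : cur.length = 0 := by simpa [List.isEmpty_iff_length_eq_zero] using hcur
      simp [hcur, this]
    · have : cur.length ≠ 0 := by
        simp only [List.isEmpty_iff_length_eq_zero] at hcur; exact hcur
      simp [hcur, this, List.reverse_cons]
  | cons c r ih =>
    intro cur acc
    simp only [List.map_cons, runLens]
    by_cases hc : (['A','E','I','O','U','a','e','i','o','u'] : List Char).contains c = true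
    · simp only [hc, if_true]
      rw [show PySem.Chars.split₀.go (c :: r.map _) cur acc
            = PySem.Chars.split₀.go (r.map (fun c => if (['A','E','I','O','U','a','e','i','o','u'] : List Char).contains c then c else ' ')) (c :: cur) acc from by
        simp [PySem.Chars.split₀.go, vowel_not_space c hc]]
      rw [ih (c :: cur) acc]
      simp
    · simp only [Bool.not_eq_true] at hc
      simp only [hc, Bool.false_eq_true, if_false]
      by_cases hcur : cur.isEmpty = true
      · have hlen : cur.length = 0 := by simpa [List.isEmpty_iff_length_eq_zero] using hcur
        rw [show PySem.Chars.split₀.go (' ' :: r.map _) cur acc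
              = PySem.Chars.split₀.go (r.map (fun c => if (['A','E','I','O','U','a','e','i','o','u'] : List Char).contains c then c else ' ')) [] acc from by
          simp [PySem.Chars.split₀.go, hcur, show PySem.Chars.isspace ' ' = true from by decide]]
        rw [ih [] acc]
        simp [hlen]
      · have hlen : cur.length ≠ 0 := by
          simp only [List.isEmpty_iff_length_eq_zero] at hcur; exact hcur
        rw [show PySem.Chars.split₀.go (' ' :: r.map _) cur acc
              = PySem.Chars.split₀.go (r.map (fun c => if (['A','E','I','O','U','a','e','i','o','u'] : List Char).contains c then c else ' ')) [] (cur.reverse :: acc) from by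
          simp [PySem.Chars.split₀.go, hcur, show PySem.Chars.isspace ' ' = true from by decide]]
        rw [ih [] (cur.reverse :: acc)]
        simp [hlen, List.reverse_cons]

-- ===== VERDICT (by name: the statement is the Claim_ definition above) =====
theorem count_vow__spec : Claim_equal_count_vow_ := by
  intro s _
  unfold Spec_count_vow_ count_vow_ count_vow__alt
  have hA : countVowLoopA s.toList 0 0 = (runLens s.toList 0).foldl max 0 := by
    simpa using loopA_eq_foldl s.toList 0 0 (by simp)
  rw [hA]
  simp only [PySem.Chars.split₀]
  rw [split_go_eq_runLens s.toList [] []]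
  simp only [List.reverse_nil, List.map_nil, List.nil_append, List.length_nil]
  cases h : runLens s.toList 0 with
  | nil => simp [PySem.List.maxD, PySem.List.max?]
  | cons x t =>
    have hx : (1 : Int) ≤ x := runLens_pos _ _ _ (h ▸ List.mem_cons_self ..)
    simp only [PySem.List.maxD, PySem.List.max?_id_cons, Option.getD_some, List.foldl_cons]
    rw [show max (0 : Int) x = x by omega]
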